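-- pv_equiv track=rewrite | github.com/zcguan/comp598_fall2021_final_project | src/tweet_annalysis.py | words_more5
-- ===== SOURCE A (Python) =====
-- def words_more5(topic_wc):
--
--     sus_words = {}
--     for topic in topic_wc:
--         for word in topic_wc[topic]:
--             if topic_wc[topic][word] < 5:
--                 if word not in sus_words:
--                     sus_words[word] = topic_wc[topic][word]
--                 else:
--                     sus_words[word] += topic_wc[topic][word]
--
--     #remove words from topic_wc if appear less than 5 times
--     for word in sus_words:
--         if sus_words[word] < 5:
--             for topic in topic_wc:
--                 if word in topic_wc[topic]:
--                     topic_wc[topic].pop(word)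
--     return topic_wc
-- ===== SOURCE B (Python) =====
-- def words_more5(topic_wc):
--     # One pass to total the sub-5 counts per word, then rebuild by filtering;
--     # returns a fresh dict (A mutates its argument in place; return values agree).
--     total = {}
--     for wc in topic_wc.values():
--         for w, c in wc.items():
--             if c < 5:
--                 total[w] = total.get(w, 0) + c
--     bad = {w for w, s in total.items() if s < 5}
--     return {t: {w: c for w, c in wc.items() if w not in bad}
--             for t, wc in topic_wc.items()}
-- ===== Notes on version B (the rewrite author's own statement) =====
-- stated objective: faster
-- what changed: B totals the sub-5 counts in one pass and rebuilds the dicts by filtering out rare words with a set, instead of A's per-rare-word scan over all topics with in-place pops (B returns a fresh dict rather than mutating the argument; return values agree).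
import Mathlib
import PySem

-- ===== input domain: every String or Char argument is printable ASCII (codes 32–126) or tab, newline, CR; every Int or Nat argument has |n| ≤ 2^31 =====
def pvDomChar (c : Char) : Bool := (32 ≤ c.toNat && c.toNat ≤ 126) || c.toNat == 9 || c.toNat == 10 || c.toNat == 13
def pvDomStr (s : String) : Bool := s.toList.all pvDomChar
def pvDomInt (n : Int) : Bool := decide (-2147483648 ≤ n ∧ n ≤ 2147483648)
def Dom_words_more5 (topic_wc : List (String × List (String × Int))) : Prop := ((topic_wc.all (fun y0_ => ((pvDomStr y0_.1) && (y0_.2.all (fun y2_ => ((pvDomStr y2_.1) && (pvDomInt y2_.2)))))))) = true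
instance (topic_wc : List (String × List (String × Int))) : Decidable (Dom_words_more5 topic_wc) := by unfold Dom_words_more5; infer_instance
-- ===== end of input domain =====

-- B totals the sub-5 counts in one pass and rebuilds the dicts by filtering against a set of
-- rare words, instead of A's per-rare-word scan over all topics with in-place pops (faster);
-- A mutates its argument in place, B builds a fresh dict — the equivalence is about the return value.

-- ===== PORT A =====
def words_more5 (topic_wc : List (String × List (String × Int))) : List (String × List (String × Int)) :=
  -- the dict-of-dicts argument, under the type convention
  let d0 : PySem.Dict String (PySem.Dict String Int) :=
    PySem.Dict.ofList (topic_wc.map (fun p => (p.1, PySem.Dict.ofList p.2)))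
  -- sus_words = {} ; for topic in topic_wc: for word in topic_wc[topic]: …
  let sus : PySem.Dict String Int :=
    d0.keys.foldl (fun s t =>
      (d0.getD t PySem.Dict.empty).keys.foldl (fun s w =>
        if (d0.getD t PySem.Dict.empty).getD w 0 < 5 then
          if s.contains w = false then s.insert w ((d0.getD t PySem.Dict.empty).getD w 0)
          else s.insert w (s.getD w 0 + (d0.getD t PySem.Dict.empty).getD w 0)
        else s) s) PySem.Dict.empty
  -- for word in sus_words: if sus_words[word] < 5: for topic in topic_wc: … pop(word)
  let d2 : PySem.Dict String (PySem.Dict String Int) :=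
    sus.keys.foldl (fun d w =>
      if sus.getD w 0 < 5 then
        d.keys.foldl (fun d t =>
          if (d.getD t PySem.Dict.empty).contains w then
            d.insert t ((d.getD t PySem.Dict.empty).erase w)
          else d) d
      else d) d0
  d2.items.map (fun p => (p.1, p.2.items))

-- ===== PORT B =====
def words_more5_alt (topic_wc : List (String × List (String × Int))) : List (String × List (String × Int)) :=
  let d0 : PySem.Dict String (PySem.Dict String Int) :=
    PySem.Dict.ofList (topic_wc.map (fun p => (p.1, PySem.Dict.ofList p.2)))
  -- total = {} ; for wc in topic_wc.values(): for w, c in wc.items(): if c < 5: total[w] = total.get(w, 0) + c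
  let total : PySem.Dict String Int :=
    d0.values.foldl (fun s wc =>
      wc.items.foldl (fun s q =>
        if q.2 < 5 then s.insert q.1 (s.getD q.1 0 + q.2) else s) s) PySem.Dict.empty
  -- bad = {w for w, s in total.items() if s < 5}
  let bad : PySem.Set String :=
    PySem.Set.ofList ((total.items.filter (fun q => decide (q.2 < 5))).map (fun q => q.1))
  -- {t: {w: c for w, c in wc.items() if w not in bad} for t, wc in topic_wc.items()}
  (PySem.Dict.ofList (d0.items.map (fun p =>
    (p.1, PySem.Dict.ofList (p.2.items.filter (fun q => !(PySem.Set.contains bad q.1))))))).items.map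
    (fun p => (p.1, p.2.items))

-- ===== PRECONDITION & SPEC =====
def Spec_words_more5 (topic_wc : List (String × List (String × Int))) (out : List (String × List (String × Int))) : Prop := out = words_more5_alt topic_wc
instance (topic_wc : List (String × List (String × Int))) (out : List (String × List (String × Int))) : Decidable (Spec_words_more5 topic_wc out) := by unfold Spec_words_more5; infer_instance

-- ===== CLAIM (what is proved, stated in full; the proofs are below) =====
def Claim_equal_words_more5 : Prop := ∀ (topic_wc : List (String × List (String × Int))), Dom_words_more5 topic_wc → Spec_words_more5 topic_wc (words_more5 topic_wc)

-- ===== LEMMAS AND PROOFS =====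

theorem pvFoldlGuard {α β : Type} (q : β → Prop) [DecidablePred q] (f : α → β → α) :
    ∀ (l : List β) (init : α),
    l.foldl (fun a x => if q x then f a x else a) init
    = (l.filter (fun x => decide (q x))).foldl f init := by
  intro l
  induction l with
  | nil => intro init; rfl
  | cons x xs ih =>
    intro init
    by_cases hx : q x <;> simp [hx, ih]

theorem pvOfListItems {κ ν : Type} [BEq κ] [LawfulBEq κ] (l : List (κ × ν))
    (h : (l.map Prod.fst).Nodup) : (PySem.Dict.ofList l).items = l := by
  have := PySem.Dict.items_foldl_insert_fresh l Prod.fst Prod.snd PySem.Dict.empty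
    (by intro a _; simp [PySem.Dict.contains_empty]) h
  simpa [PySem.Dict.ofList, PySem.Dict.update] using this

theorem pvMemValuesOfList {κ ν : Type} [BEq κ] [LawfulBEq κ] (l : List (κ × ν)) (v : ν)
    (h : v ∈ (PySem.Dict.ofList l).values) : v ∈ l.map Prod.snd := by
  have gen : ∀ (l : List (κ × ν)) (d : PySem.Dict κ ν) (v : ν),
      v ∈ (l.foldl (fun acc p => acc.insert p.1 p.2) d).values → v ∈ d.values ∨ v ∈ l.map Prod.snd := by
    intro l
    induction l with
    | nil => intro d v hv; exact Or.inl hv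
    | cons x xs ih =>
      intro d v hv
      rcases ih _ _ hv with h1 | h1
      · rcases PySem.Dict.mem_values_insert d x.1 x.2 v h1 with h2 | h2
        · right; simp [h2]
        · exact Or.inl h2
      · right; simp [h1]
  rcases gen l PySem.Dict.empty v (by simpa [PySem.Dict.ofList, PySem.Dict.update] using h) with h1 | h1
  · simp [PySem.Dict.values, PySem.Dict.empty] at h1
  · exact h1

theorem pvEraseAbsent (wc : PySem.Dict String Int) (w : String)
    (h : wc.contains w = false) : wc.erase w = wc := by
  apply PySem.Dict.ext
  simp only [PySem.Dict.erase]
  apply List.filter_eq_self.mpr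
  intro p hp
  simp [PySem.Dict.contains] at h
  simp [h p.1 p.2 hp]

theorem pvEraseIdem (wc : PySem.Dict String Int) (w : String) :
    (wc.erase w).erase w = wc.erase w := by
  apply PySem.Dict.ext
  simp only [PySem.Dict.erase, List.filter_filter, Bool.and_self]

theorem pvFoldErase (ws : List String) : ∀ (wc : PySem.Dict String Int),
    (ws.foldl (fun wc w => PySem.Dict.erase wc w) wc).items
    = wc.items.filter (fun q => !(ws.contains q.1)) := by
  induction ws with
  | nil => intro wc; simp
  | cons w ws ih =>
    intro wc
    rw [List.foldl_cons, ih, PySem.Dict.erase, List.filter_filter]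
    apply List.filter_congr
    intro q _
    by_cases hqw : q.1 = w
    · simp [hqw]
    · simp [hqw, Bool.and_comm]

theorem pvRareList (s : PySem.Dict String Int) (h : s.keys.Nodup) :
    s.keys.filter (fun w => decide (s.getD w 0 < 5))
    = (s.items.filter (fun q => decide (q.2 < 5))).map (fun q => q.1) := by
  rw [PySem.Dict.keys, List.filter_map]
  congr 1
  apply List.filter_congr
  intro q hq
  have : s.getD q.1 0 = q.2 := PySem.Dict.getD_of_mem_items s (by exact hq) h 0
  simp [this]

theorem pvInner1 (wc : PySem.Dict String Int) (h : wc.keys.Nodup) (s : PySem.Dict String Int) :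
    wc.keys.foldl (fun s w =>
      if wc.getD w 0 < 5 then
        if s.contains w = false then s.insert w (wc.getD w 0)
        else s.insert w (s.getD w 0 + wc.getD w 0)
      else s) s
    = wc.items.foldl (fun s q => if q.2 < 5 then s.insert q.1 (s.getD q.1 0 + q.2) else s) s := by
  rw [PySem.Dict.keys, List.foldl_map]
  apply PySem.List.foldl_congr_mem
  intro acc q hq
  have hv : wc.getD q.1 0 = q.2 := PySem.Dict.getD_of_mem_items wc hq h 0
  rw [hv]
  by_cases hc : acc.contains q.1
  · simp [hc]
  · have h0 : acc.getD q.1 0 = 0 :=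
      PySem.Dict.getD_of_not_contains acc 0 (by simpa using hc)
    simp [hc, h0]

theorem pvStep2Items (d : PySem.Dict String (PySem.Dict String Int)) (hd : d.keys.Nodup)
    (w t : String) :
    (if (d.getD t PySem.Dict.empty).contains w then
        d.insert t ((d.getD t PySem.Dict.empty).erase w)
      else d).items
    = d.items.map (fun p => if p.1 = t then (p.1, p.2.erase w) else p) := by
  by_cases hc : d.contains t
  · obtain ⟨v, hv⟩ : ∃ v, d.get? t = some v := by
      have := PySem.Dict.contains_eq_isSome_get? d t
      rw [hc] at this
      exact Option.isSome_iff_exists.mp this.symm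
    have hmem : (t, v) ∈ d.items := (PySem.Dict.get?_eq_some_iff_mem_items d t v hd).mp hv
    have hg : d.getD t PySem.Dict.empty = v := PySem.Dict.getD_of_get?_eq_some d _ hv
    have huniq : ∀ p ∈ d.items, p.1 = t → p.2 = v := by
      intro p hp hpt
      have : d.get? t = some p.2 := by
        apply (PySem.Dict.get?_eq_some_iff_mem_items d t p.2 hd).mpr
        rw [← hpt]; exact hp
      rw [hv] at this; exact (Option.some_inj.mp this).symm
    rw [hg]
    by_cases hvw : v.contains w
    · rw [if_pos hvw, PySem.Dict.items_insert_of_contains d _ hc]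
      apply List.map_congr_left
      intro p hp
      by_cases hpt : p.1 = t
      · simp [hpt, huniq p hp hpt]
      · simp [hpt]
    · rw [if_neg (by simp [hvw])]
      have : List.map (fun p : String × PySem.Dict String Int => if p.1 = t then (p.1, p.2.erase w) else p) d.items = List.map id d.items := by
        apply List.map_congr_left
        intro p hp
        by_cases hpt : p.1 = t
        · have h2 := huniq p hp hpt
          rw [if_pos hpt, h2, pvEraseAbsent v w (by simpa using hvw), ← h2]
          simp
        · simp [hpt]
      rw [this, List.map_id]
  · have hget : d.getD t PySem.Dict.empty = PySem.Dict.empty :=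
      PySem.Dict.getD_of_not_contains d _ (by simpa using hc)
    rw [hget, if_neg (by simp [PySem.Dict.contains_empty])]
    have : List.map (fun p : String × PySem.Dict String Int => if p.1 = t then (p.1, p.2.erase w) else p) d.items = List.map id d.items := by
      apply List.map_congr_left
      intro p hp
      have hpt : p.1 ≠ t := by
        intro hpt
        apply absurd hc
        simp only [not_not]
        apply (PySem.Dict.contains_iff_mem_keys d t).mpr
        rw [PySem.Dict.keys, ← hpt]
        exact List.mem_map_of_mem hp
      simp [hpt]
    rw [this, List.map_id]

theorem pvStep2Keys (d : PySem.Dict String (PySem.Dict String Int)) (hd : d.keys.Nodup)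
    (w t : String) :
    (if (d.getD t PySem.Dict.empty).contains w then
        d.insert t ((d.getD t PySem.Dict.empty).erase w)
      else d).keys = d.keys := by
  rw [PySem.Dict.keys, pvStep2Items d hd w t, List.map_map, PySem.Dict.keys]
  apply List.map_congr_left
  intro p _
  by_cases hpt : p.1 = t <;> simp [hpt]

theorem pvEpochItems (w : String) : ∀ (ts : List String)
    (d : PySem.Dict String (PySem.Dict String Int)), d.keys.Nodup →
    (ts.foldl (fun d t =>
      if (d.getD t PySem.Dict.empty).contains w then
        d.insert t ((d.getD t PySem.Dict.empty).erase w)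
      else d) d).items
    = d.items.map (fun p => if p.1 ∈ ts then (p.1, p.2.erase w) else p) := by
  intro ts
  induction ts with
  | nil => intro d hd; simp
  | cons t ts ih =>
    intro d hd
    rw [List.foldl_cons]
    have hd' : (if (d.getD t PySem.Dict.empty).contains w then
        d.insert t ((d.getD t PySem.Dict.empty).erase w) else d).keys.Nodup := by
      rw [pvStep2Keys d hd w t]; exact hd
    rw [ih _ hd', pvStep2Items d hd w t, List.map_map]
    apply List.map_congr_left
    intro p _
    by_cases hpt : p.1 = t
    · subst hpt
      by_cases hpts : p.1 ∈ ts
      · simp [hpts, pvEraseIdem]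
      · simp [hpts]
    · by_cases hpts : p.1 ∈ ts <;>
        simp [hpt, hpts]

theorem pvPhase2 (ws : List String) : ∀ (d : PySem.Dict String (PySem.Dict String Int)),
    d.keys.Nodup →
    (ws.foldl (fun d w =>
      d.keys.foldl (fun d t =>
        if (d.getD t PySem.Dict.empty).contains w then
          d.insert t ((d.getD t PySem.Dict.empty).erase w)
        else d) d) d).items
    = d.items.map (fun p => (p.1, ws.foldl (fun wc w => PySem.Dict.erase wc w) p.2)) := by
  induction ws with
  | nil => intro d hd; simp
  | cons w ws ih =>
    intro d hd
    rw [List.foldl_cons]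
    have hstep := pvEpochItems w d.keys d hd
    have hkeys : (d.keys.foldl (fun d t =>
        if (d.getD t PySem.Dict.empty).contains w then
          d.insert t ((d.getD t PySem.Dict.empty).erase w)
        else d) d).keys = d.keys := by
      have : ∀ (ts : List String) (d' : PySem.Dict String (PySem.Dict String Int)), d'.keys.Nodup →
          (ts.foldl (fun d t =>
            if (d.getD t PySem.Dict.empty).contains w then
              d.insert t ((d.getD t PySem.Dict.empty).erase w)
            else d) d').keys = d'.keys := by
        intro ts
        induction ts with
        | nil => intro d' _; rfl
        | cons t ts ih2 =>
          intro d' hd'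
          rw [List.foldl_cons, ih2, pvStep2Keys d' hd' w t]
          rw [pvStep2Keys d' hd' w t]; exact hd'
      exact this d.keys d hd
    rw [ih _ (by rw [hkeys]; exact hd), hstep, List.map_map]
    apply List.map_congr_left
    intro p hp
    have hpk : p.1 ∈ d.keys := by rw [PySem.Dict.keys]; exact List.mem_map_of_mem hp
    simp [hpk]

theorem pvPhase1 (d : PySem.Dict String (PySem.Dict String Int)) (hd : d.keys.Nodup)
    (hin : ∀ p ∈ d.items, (p.2 : PySem.Dict String Int).keys.Nodup) :
    d.keys.foldl (fun s t =>
      (d.getD t PySem.Dict.empty).keys.foldl (fun s w =>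
        if (d.getD t PySem.Dict.empty).getD w 0 < 5 then
          if s.contains w = false then s.insert w ((d.getD t PySem.Dict.empty).getD w 0)
          else s.insert w (s.getD w 0 + (d.getD t PySem.Dict.empty).getD w 0)
        else s) s) PySem.Dict.empty
    = d.values.foldl (fun s wc =>
        wc.items.foldl (fun s q =>
          if q.2 < 5 then s.insert q.1 (s.getD q.1 0 + q.2) else s) s) PySem.Dict.empty := by
  rw [PySem.Dict.keys, PySem.Dict.values, List.foldl_map, List.foldl_map]
  apply PySem.List.foldl_congr_mem
  intro acc p hp
  have hv : d.getD p.1 PySem.Dict.empty = p.2 := PySem.Dict.getD_of_mem_items d hp hd _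
  rw [hv]
  exact pvInner1 p.2 (hin p hp) acc

theorem pvFoldlInv {α β : Type} (P : α → Prop) (f : α → β → α)
    (h : ∀ a b, P a → P (f a b)) : ∀ (l : List β) (a : α), P a → P (l.foldl f a) := by
  intro l; induction l with
  | nil => intro a ha; exact ha
  | cons x xs ih => intro a ha; exact ih _ (h a x ha)







-- the common counting dict has pairwise-distinct keys
theorem pvSusNodup (d : PySem.Dict String (PySem.Dict String Int)) :
    (d.values.foldl (fun s wc =>
        wc.items.foldl (fun s q =>
          if q.2 < 5 then s.insert q.1 (s.getD q.1 0 + q.2) else s) s)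
      (PySem.Dict.empty : PySem.Dict String Int)).keys.Nodup := by
  apply pvFoldlInv (fun s : PySem.Dict String Int => s.keys.Nodup)
  · intro s wc hs
    apply pvFoldlInv (fun s : PySem.Dict String Int => s.keys.Nodup)
    · intro s q hs'
      by_cases hq : q.2 < 5
      · simpa [hq] using PySem.Dict.nodup_keys_insert s q.1 _ hs'
      · simpa [hq] using hs'
    · exact hs
  · simp [PySem.Dict.keys, PySem.Dict.empty]

-- the whole equivalence, over the normalised dict of dicts
theorem pvMain (d0 : PySem.Dict String (PySem.Dict String Int)) (hd : d0.keys.Nodup)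
    (hin : ∀ p ∈ d0.items, (p.2 : PySem.Dict String Int).keys.Nodup) :
    (let sus : PySem.Dict String Int :=
      d0.keys.foldl (fun s t =>
        (d0.getD t PySem.Dict.empty).keys.foldl (fun s w =>
          if (d0.getD t PySem.Dict.empty).getD w 0 < 5 then
            if s.contains w = false then s.insert w ((d0.getD t PySem.Dict.empty).getD w 0)
            else s.insert w (s.getD w 0 + (d0.getD t PySem.Dict.empty).getD w 0)
          else s) s) PySem.Dict.empty
    let d2 : PySem.Dict String (PySem.Dict String Int) :=
      sus.keys.foldl (fun d w =>
        if sus.getD w 0 < 5 then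
          d.keys.foldl (fun d t =>
            if (d.getD t PySem.Dict.empty).contains w then
              d.insert t ((d.getD t PySem.Dict.empty).erase w)
            else d) d
        else d) d0
    d2.items.map (fun p => (p.1, p.2.items)))
    = (let total : PySem.Dict String Int :=
        d0.values.foldl (fun s wc =>
          wc.items.foldl (fun s q =>
            if q.2 < 5 then s.insert q.1 (s.getD q.1 0 + q.2) else s) s) PySem.Dict.empty
      let bad : PySem.Set String :=
        PySem.Set.ofList ((total.items.filter (fun q => decide (q.2 < 5))).map (fun q => q.1))
      (PySem.Dict.ofList (d0.items.map (fun p =>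
        (p.1, PySem.Dict.ofList (p.2.items.filter (fun q => !(PySem.Set.contains bad q.1))))))).items.map
        (fun p => (p.1, p.2.items))) := by
  simp only []
  rw [pvPhase1 d0 hd hin]
  set T : PySem.Dict String Int :=
    d0.values.foldl (fun s wc =>
      wc.items.foldl (fun s q =>
        if q.2 < 5 then s.insert q.1 (s.getD q.1 0 + q.2) else s) s) PySem.Dict.empty with hT
  have hTnd : T.keys.Nodup := pvSusNodup d0
  set ws : List String := T.keys.filter (fun w => decide (T.getD w 0 < 5)) with hws
  have hwsnd : ws.Nodup := hTnd.filter _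
  -- A side
  rw [pvFoldlGuard (fun w => T.getD w 0 < 5)
    (fun d w => d.keys.foldl (fun d t =>
      if (d.getD t PySem.Dict.empty).contains w then
        d.insert t ((d.getD t PySem.Dict.empty).erase w)
      else d) d) T.keys d0, ← hws, pvPhase2 ws d0 hd, List.map_map]
  -- B side: identify bad with ws
  have hbad : PySem.Set.ofList ((T.items.filter (fun q => decide (q.2 < 5))).map (fun q => q.1)) = ws := by
    rw [← pvRareList T hTnd, ← hws]
    exact PySem.Set.ofList_eq_self_of_nodup _ hwsnd
  rw [hbad]
  -- flatten the outer ofList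
  have houter : ((d0.items.map (fun p =>
      (p.1, PySem.Dict.ofList (p.2.items.filter (fun q => !(PySem.Set.contains ws q.1)))))).map Prod.fst).Nodup := by
    rw [List.map_map]
    exact hd
  rw [pvOfListItems _ houter, List.map_map]
  apply List.map_congr_left
  intro p hp
  simp only [Function.comp]
  rw [pvFoldErase ws p.2]
  congr 1
  have hfl : ((p.2.items.filter (fun q => !(PySem.Set.contains ws q.1))).map Prod.fst).Nodup := by
    apply List.Nodup.sublist (List.Sublist.map Prod.fst List.filter_sublist)
    exact hin p hp
  rw [pvOfListItems _ hfl]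
  apply List.filter_congr
  intro q _
  simp [PySem.Set.contains_eq_listContains]

-- ===== VERDICT (by name: the statement is the Claim_ definition above) =====
theorem words_more5_spec : Claim_equal_words_more5 := by
  intro tw _
  unfold Spec_words_more5 words_more5 words_more5_alt
  set l := tw.map (fun p => (p.1, PySem.Dict.ofList p.2)) with hl
  have hd : (PySem.Dict.ofList l).keys.Nodup := PySem.Dict.nodup_keys_ofList l
  have hin : ∀ p ∈ (PySem.Dict.ofList l).items, (p.2 : PySem.Dict String Int).keys.Nodup := by
    intro p hp
    have hv : p.2 ∈ (PySem.Dict.ofList l).values := by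
      rw [PySem.Dict.values]; exact List.mem_map_of_mem hp
    have h2 := pvMemValuesOfList l p.2 hv
    rw [hl, List.map_map] at h2
    obtain ⟨x, _, hx⟩ := List.mem_map.mp h2
    rw [← hx]
    exact PySem.Dict.nodup_keys_ofList _
  exact pvMain (PySem.Dict.ofList l) hd hin
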